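-- pv_equiv track=rewrite | github.com/katkelemen/streakp | streakp/goals/streak.py | get_streak
-- ===== SOURCE A (Python) =====
-- def get_streak(values):
--     if values:
--         cons = [values[0]]
--         for val in values[1:]:
--             if cons[-1] == val-1:
--                 cons.append(val)
--             else:
--                 cons = [val]
--         return len(cons)
--     else:
--         return 0
-- ===== SOURCE B (Python) =====
-- def get_streak(values):
--     if not values:
--         return 0
--     count = 1
--     for i in range(len(values) - 1, 0, -1):
--         if values[i - 1] == values[i] - 1:
--             count += 1
--         else:
--             break
--     return count
-- ===== Notes on version B (the rewrite author's own statement) =====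
-- stated objective: faster
-- what changed: B walks only the final run backward from the end with a single integer counter and an early break, instead of A's full forward pass over the whole list that rebuilds a Python list for every run.
import Mathlib
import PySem

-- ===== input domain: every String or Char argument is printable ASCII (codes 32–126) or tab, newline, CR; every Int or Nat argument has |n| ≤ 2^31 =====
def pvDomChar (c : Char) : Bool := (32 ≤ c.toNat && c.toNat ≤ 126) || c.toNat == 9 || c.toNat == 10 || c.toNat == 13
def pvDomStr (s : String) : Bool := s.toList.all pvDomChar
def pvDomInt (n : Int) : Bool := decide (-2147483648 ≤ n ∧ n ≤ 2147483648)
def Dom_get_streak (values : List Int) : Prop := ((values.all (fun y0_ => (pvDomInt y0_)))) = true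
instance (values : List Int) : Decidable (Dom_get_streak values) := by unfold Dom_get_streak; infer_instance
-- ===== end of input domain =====

-- B walks only the final run backward from the end with one counter and an early break, instead of A's forward pass rebuilding a list per run (objective: simpler).

-- ===== PORT A =====
-- one loop iteration of A: 'if cons[-1] == val-1: cons.append(val) else: cons = [val]'
def stepA (cons : List Int) (val : Int) : List Int :=
  if PySem.List.pyGet? cons (-1) = some (val - 1) then cons ++ [val] else [val]

def get_streak (values : List Int) : Int :=
  match values with
  | [] => 0
  | v :: rest => ((rest.foldl stepA [v]).length : Int)

-- ===== PORT B =====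
-- backward walk from the end: counts while values[i-1] == values[i]-1, breaks at first failure
def goB : Int → List Int → Int
  | _, [] => 0
  | cur, x :: xs => if x = cur - 1 then 1 + goB x xs else 0

def get_streak_alt (values : List Int) : Int :=
  match values.reverse with
  | [] => 0
  | v :: rest => 1 + goB v rest

-- ===== PRECONDITION & SPEC =====
def Spec_get_streak (values : List Int) (out : Int) : Prop := out = get_streak_alt values
instance (values : List Int) (out : Int) : Decidable (Spec_get_streak values out) := by unfold Spec_get_streak; infer_instance

-- ===== CLAIM (what is proved, stated in full; the proofs are below) =====
def Claim_equal_get_streak : Prop := ∀ (values : List Int), Dom_get_streak values → Spec_get_streak values (get_streak values)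

-- ===== LEMMAS AND PROOFS =====

-- invariant of A's loop: cons is nonempty, ends at the last processed value,
-- and its length is B's answer on the processed prefix
lemma foldl_inv (v0 : Int) (xs : List Int) :
    (xs.foldl stepA [v0]) ≠ [] ∧
    (xs.foldl stepA [v0]).getLast? = (v0 :: xs).getLast? ∧
    ((xs.foldl stepA [v0]).length : Int) = get_streak_alt (v0 :: xs) := by
  induction xs using List.reverseRecOn with
  | nil => simp [get_streak_alt, goB]
  | append_singleton ys y ih =>
    obtain ⟨hne, hlast, hlen⟩ := ih
    rw [List.foldl_append, List.foldl_cons, List.foldl_nil]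
    set c := ys.foldl stepA [v0] with hc
    -- decompose (v0 :: ys).reverse
    rcases hrev : (v0 :: ys).reverse with - | ⟨v, r⟩
    · exact absurd hrev (by simp)
    have hlastv : (v0 :: ys).getLast? = some v := by
      rw [← List.head?_reverse, hrev]; rfl
    have haltys : get_streak_alt (v0 :: ys) = 1 + goB v r := by
      unfold get_streak_alt; rw [hrev]
    have haltnew : get_streak_alt (v0 :: (ys ++ [y])) = 1 + goB y (v :: r) := by
      unfold get_streak_alt
      have : (v0 :: (ys ++ [y])).reverse = y :: v :: r := by
        simp only [← List.cons_append, List.reverse_append, List.reverse_cons,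
          List.reverse_nil, List.nil_append, List.singleton_append, hrev]
      rw [this]
    have hget : PySem.List.pyGet? c (-1) = c.getLast? := PySem.List.pyGet?_neg_one c
    unfold stepA
    rw [hget, hlast, hlastv]
    by_cases hv : v = y - 1
    · have : (some v = some (y - 1)) := by rw [hv]
      rw [if_pos this, haltnew]
      refine ⟨by simp, ?_, ?_⟩
      · rw [show v0 :: (ys ++ [y]) = (v0 :: ys) ++ [y] by simp,
          List.getLast?_concat, List.getLast?_concat]
      · simp only [List.length_append, List.length_cons, List.length_nil, goB,
          if_pos hv, ← haltys]
        push_cast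
        omega
    · have : ¬ (some v = some (y - 1)) := by simpa using hv
      rw [if_neg this, haltnew]
      refine ⟨by simp, ?_, ?_⟩
      · rw [show v0 :: (ys ++ [y]) = (v0 :: ys) ++ [y] by simp,
          List.getLast?_concat]
        rfl
      simp [goB, hv]

-- ===== VERDICT (by name: the statement is the Claim_ definition above) =====
theorem get_streak_spec : Claim_equal_get_streak := by
  intro values _
  unfold Spec_get_streak
  match values with
  | [] => rfl
  | v :: rest =>
    exact (foldl_inv v rest).2.2
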